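-- pv_equiv track=rewrite | github.com/danielhuf/INF1025 | Lista_P1.py | contIgual
-- ===== SOURCE A (Python) =====
-- def contIgual(s1,s2):
--     if (not s1 and s2) or (not s2 and s1):
--         return False
--     elif not s1 and not s2:
--         return True
--     elif s1[0]!=s2[0]:
--         return False
--     else:
--         return contIgual(s1[1:],s2[1:])
-- ===== SOURCE B (Python) =====
-- def contIgual(s1, s2):
--     if len(s1) != len(s2):
--         return False
--     for a, b in zip(s1, s2):
--         if a != b:
--             return False
--     return True
-- ===== Notes on version B (the rewrite author's own statement) =====
-- stated objective: faster
-- what changed: Replaces the recursion over sliced tails (each slice copies the remaining string) with a length check followed by one forward pass over zipped character pairs.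
import Mathlib
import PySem

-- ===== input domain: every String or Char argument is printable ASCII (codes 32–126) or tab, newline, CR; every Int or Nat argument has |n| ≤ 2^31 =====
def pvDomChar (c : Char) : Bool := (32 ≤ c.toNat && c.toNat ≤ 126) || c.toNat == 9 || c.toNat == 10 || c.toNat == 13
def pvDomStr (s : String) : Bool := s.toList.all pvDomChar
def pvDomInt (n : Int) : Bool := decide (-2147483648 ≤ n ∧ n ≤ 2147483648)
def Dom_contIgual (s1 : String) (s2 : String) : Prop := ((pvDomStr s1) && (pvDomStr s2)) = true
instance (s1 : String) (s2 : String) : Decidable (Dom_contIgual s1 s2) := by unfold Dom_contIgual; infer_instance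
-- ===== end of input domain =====

-- B replaces A's tail recursion over string slices by a length check plus one pass over zipped pairs (faster: no per-step slice copies).

-- ===== PORT A =====
-- recursion of A on the character lists: emptiness tests, head comparison, recurse on tails (s[1:])
def contIgualGo : List Char → List Char → Bool
  | [], _ :: _ => false
  | _ :: _, [] => false
  | [], [] => true
  | a :: t1, b :: t2 => if a ≠ b then false else contIgualGo t1 t2

def contIgual (s1 : String) (s2 : String) : Bool := contIgualGo s1.toList s2.toList

-- ===== PORT B =====
def contIgual_alt (s1 : String) (s2 : String) : Bool :=
  if s1.toList.length ≠ s2.toList.length then false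
  else (s1.toList.zip s2.toList).all (fun p => p.1 == p.2)

-- ===== PRECONDITION & SPEC =====
def Spec_contIgual (s1 : String) (s2 : String) (out : Bool) : Prop := out = contIgual_alt s1 s2
instance (s1 : String) (s2 : String) (out : Bool) : Decidable (Spec_contIgual s1 s2 out) := by unfold Spec_contIgual; infer_instance

-- ===== CLAIM (what is proved, stated in full; the proofs are below) =====
def Claim_equal_contIgual : Prop := ∀ (s1 : String) (s2 : String), Dom_contIgual s1 s2 → Spec_contIgual s1 s2 (contIgual s1 s2)

-- ===== LEMMAS AND PROOFS =====
theorem contIgualGo_eq (l1 : List Char) : ∀ l2 : List Char,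
    contIgualGo l1 l2 =
      (if l1.length ≠ l2.length then false else (l1.zip l2).all (fun p => p.1 == p.2)) := by
  induction l1 with
  | nil =>
      intro l2; cases l2 <;> simp [contIgualGo]
  | cons a t1 ih =>
      intro l2
      cases l2 with
      | nil => simp [contIgualGo]
      | cons b t2 =>
          by_cases h : a = b <;>
            simp [contIgualGo, h, ih t2]

-- ===== VERDICT (by name: the statement is the Claim_ definition above) =====
theorem contIgual_spec : Claim_equal_contIgual := by
  intro s1 s2 _
  unfold Spec_contIgual contIgual contIgual_alt
  exact contIgualGo_eq s1.toList s2.toList
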